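-- pv_equiv track=rewrite | github.com/juglab/napari-n2v | src/napari_n2v/utils/n2v_utils.py | are_axes_valid
-- ===== SOURCE A (Python) =====
-- REF_AXES = 'TSZYXC'  # order of axes in N2V, not that `C` is allowed only for singleton
--
-- def are_axes_valid(axes: str):
--     _axes = axes.upper()
--
--     # length 0 and > 5 are not accepted (no channel)
--     if 0 > len(_axes) > 5:
--         return False
--
--     # all characters must be in REF_AXES[:-1] = 'STZYX'
--     # We disallow the `C` channel here
--     if not all([s in REF_AXES[:-1] for s in _axes]):
--         return False
--
--     # check for repeating characters
--     for i, s in enumerate(_axes):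
--         if i != _axes.rfind(s):
--             return False
--
--     return True
-- ===== SOURCE B (Python) =====
-- REF_AXES = 'TSZYXC'  # order of axes in N2V, not that `C` is allowed only for singleton
--
--
-- def are_axes_valid(axes: str):
--     _axes = axes.upper()
--     allowed = set('TSZYX')
--     return all(c in allowed for c in _axes) and len(set(_axes)) == len(_axes)
-- ===== Notes on version B (the rewrite author's own statement) =====
-- stated objective: faster
-- what changed: Replaces the per-character rfind duplicate-detection loop (a linear scan per character) with a single set-cardinality comparison len(set(s)) == len(s), tests membership against a set built once, and drops the dead `0 > len > 5` guard.
import Mathlib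
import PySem

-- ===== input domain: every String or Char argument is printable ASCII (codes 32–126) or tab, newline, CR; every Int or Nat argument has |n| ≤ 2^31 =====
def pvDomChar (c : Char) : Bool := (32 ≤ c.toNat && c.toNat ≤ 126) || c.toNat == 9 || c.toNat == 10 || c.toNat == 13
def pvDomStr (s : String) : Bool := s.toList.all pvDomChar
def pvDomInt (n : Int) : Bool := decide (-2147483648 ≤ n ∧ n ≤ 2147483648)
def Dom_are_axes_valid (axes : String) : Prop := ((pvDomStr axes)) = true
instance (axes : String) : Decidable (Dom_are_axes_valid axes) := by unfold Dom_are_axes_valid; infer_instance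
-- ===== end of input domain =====

-- ===== PORT A =====
-- B drops A's rfind duplicate-scan for a set-cardinality check and the dead length guard (objective: simpler).
def REF_AXES : String := "TSZYXC"

def are_axes_valid (axes : String) : Bool :=
  let _axes := PySem.Str.upper axes
  -- length 0 and > 5 are not accepted (chained comparison 0 > len > 5)
  if 0 > PySem.Str.len _axes ∧ PySem.Str.len _axes > 5 then
    false
  -- all characters must be in REF_AXES[:-1]
  else if ¬ ((_axes.toList.map (fun s =>
      PySem.Str.isIn (String.ofList [s]) (PySem.Str.slice REF_AXES none (some (-1))))).all (fun b => b) = true) then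
    false
  else
    -- for i, s in enumerate(_axes): if i != _axes.rfind(s): return False; return True
    (PySem.List.enumerate _axes.toList).all (fun p =>
      decide (p.1 = PySem.Str.rfind _axes (String.ofList [p.2])))

-- ===== PORT B =====
def are_axes_valid_alt (axes : String) : Bool :=
  let _axes := PySem.Str.upper axes
  let allowed : PySem.Set Char := PySem.Set.ofList "TSZYX".toList
  _axes.toList.all (fun c => PySem.Set.contains allowed c) &&
    ((PySem.Set.ofList _axes.toList : List Char).length == _axes.toList.length)

-- ===== PRECONDITION & SPEC =====
def Spec_are_axes_valid (axes : String) (out : Bool) : Prop := out = are_axes_valid_alt axes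
instance (axes : String) (out : Bool) : Decidable (Spec_are_axes_valid axes out) := by unfold Spec_are_axes_valid; infer_instance

-- ===== CLAIM (what is proved, stated in full; the proofs are below) =====
def Claim_equal_are_axes_valid : Prop := ∀ (axes : String), Dom_are_axes_valid axes → Spec_are_axes_valid axes (are_axes_valid axes)

-- ===== LEMMAS AND PROOFS =====

-- [c] is a prefix of l.drop k iff l[k]? = some c
theorem pv_single_isPrefixOf_drop (l : List Char) (c : Char) (k : Nat) :
    [c].isPrefixOf (l.drop k) = true ↔ l[k]? = some c := by
  rw [List.isPrefixOf_iff_prefix, ← List.head?_drop]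
  cases l.drop k with
  | nil => simp
  | cons a t =>
    constructor
    · rintro ⟨u, hu⟩; simp at hu; simp [hu.1]
    · intro h; simp at h; exact ⟨t, by simp [h]⟩

-- every hit at an index ≤ n bounds go from below
theorem pv_rfind_go_ge (l : List Char) (c : Char) (n k : Nat) (hk : k ≤ n)
    (hc : l[k]? = some c) : (k : Int) ≤ PySem.Chars.rfind.go l [c] n := by
  induction n with
  | zero =>
    interval_cases k
    rw [show PySem.Chars.rfind.go l [c] 0 = if [c].isPrefixOf (l.drop 0) then 0 else -1 by
      simp [PySem.Chars.rfind.go]]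
    rw [if_pos ((pv_single_isPrefixOf_drop l c 0).2 hc)]
    simp
  | succ m ih =>
    rw [show PySem.Chars.rfind.go l [c] (m+1)
        = if [c].isPrefixOf (l.drop (m+1)) then ((m:Int)+1) else PySem.Chars.rfind.go l [c] m by
      simp [PySem.Chars.rfind.go]]
    split_ifs with h
    · omega
    · rcases Nat.lt_or_ge k (m+1) with hlt | hge
      · exact ih (by omega)
      · exfalso
        have hk1 : k = m + 1 := by omega
        exact h ((pv_single_isPrefixOf_drop l c (m+1)).2 (hk1 ▸ hc))

-- go returns -1 or an index of a hit
theorem pv_rfind_go_hit (l : List Char) (c : Char) (n : Nat) :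
    PySem.Chars.rfind.go l [c] n = -1 ∨
      ∃ k, k ≤ n ∧ PySem.Chars.rfind.go l [c] n = (k : Int) ∧ l[k]? = some c := by
  induction n with
  | zero =>
    rw [show PySem.Chars.rfind.go l [c] 0 = if [c].isPrefixOf (l.drop 0) then 0 else -1 by
      simp [PySem.Chars.rfind.go]]
    split_ifs with h
    · exact Or.inr ⟨0, le_refl _, rfl, (pv_single_isPrefixOf_drop l c 0).1 h⟩
    · exact Or.inl rfl
  | succ m ih =>
    rw [show PySem.Chars.rfind.go l [c] (m+1)
        = if [c].isPrefixOf (l.drop (m+1)) then ((m:Int)+1) else PySem.Chars.rfind.go l [c] m by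
      simp [PySem.Chars.rfind.go]]
    split_ifs with h
    · exact Or.inr ⟨m+1, le_refl _, by push_cast; ring, (pv_single_isPrefixOf_drop l c (m+1)).1 h⟩
    · rcases ih with h1 | ⟨k, hk, h2, h3⟩
      · exact Or.inl h1
      · exact Or.inr ⟨k, by omega, h2, h3⟩

-- the rfind-loop condition holds at every position iff the list has no duplicates
theorem pv_rfind_all_iff_nodup (l : List Char) :
    (∀ i : Nat, (h : i < l.length) → PySem.Chars.rfind l [l[i]] = (i : Int)) ↔ l.Nodup := by
  constructor
  · intro H
    rw [List.nodup_iff_injective_get]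
    intro ⟨i, hi⟩ ⟨j, hj⟩ hij
    simp only [List.get_eq_getElem] at hij
    by_contra hne
    simp only [Fin.mk.injEq] at hne
    rcases Nat.lt_or_ge i j with hlt | hge
    · have := H i hi
      have hgo := pv_rfind_go_ge l (l[i]) l.length j (by omega)
        (by rw [List.getElem?_eq_getElem hj]; exact congrArg some hij.symm)
      rw [show PySem.Chars.rfind l [l[i]] = PySem.Chars.rfind.go l [l[i]] l.length from rfl] at this
      omega
    · have hlt2 : j < i := by omega
      have := H j hj
      have hgo := pv_rfind_go_ge l (l[j]) l.length i (by omega)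
        (by rw [List.getElem?_eq_getElem hi]; exact congrArg some hij)
      rw [show PySem.Chars.rfind l [l[j]] = PySem.Chars.rfind.go l [l[j]] l.length from rfl] at this
      omega
  · intro hnd i hi
    have hge := pv_rfind_go_ge l (l[i]) l.length i (by omega) (by simp)
    rcases pv_rfind_go_hit l (l[i]) l.length with h1 | ⟨k, hk, h2, h3⟩
    · rw [show PySem.Chars.rfind l [l[i]] = PySem.Chars.rfind.go l [l[i]] l.length from rfl] at *
      omega
    · rw [show PySem.Chars.rfind l [l[i]] = PySem.Chars.rfind.go l [l[i]] l.length from rfl] at *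
      rw [h2]
      have hkl : k < l.length := by
        by_contra hge
        rw [List.getElem?_eq_none (by omega)] at h3
        simp at h3
      have : l[k] = l[i] := by
        have := h3; rw [List.getElem?_eq_getElem hkl] at this; exact Option.some.inj this
      have hki : k = i := by
        have hinj := List.nodup_iff_injective_get.1 hnd
          (a₁ := ⟨k, hkl⟩) (a₂ := ⟨i, hi⟩) (by simpa using this)
        simpa using hinj
      simp [hki]

-- distinct-element count equals length iff no duplicates
theorem pv_ofList_length_iff_nodup (l : List Char) :
    ((PySem.Set.ofList l : List Char).length = l.length) ↔ l.Nodup := by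
  have hcard : (PySem.Set.ofList l : List Char).length = l.toFinset.card := by
    rw [← List.toFinset_card_of_nodup (PySem.Set.nodup_ofList l)]
    congr 1
    apply Finset.ext; intro a
    simp [PySem.Set.mem_ofList]
  rw [hcard, List.card_toFinset]
  constructor
  · intro h
    have := List.Sublist.eq_of_length (List.dedup_sublist l) h
    rw [← this]; exact List.nodup_dedup l
  · intro h; rw [List.dedup_eq_self.2 h]

-- a character is in "TSZYX" (as a substring test) iff it is in the allowed set
theorem pv_allowed_iff (c : Char) :
    PySem.Chars.isIn [c] "TSZYX".toList = PySem.Set.contains (PySem.Set.ofList "TSZYX".toList) c := by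
  rw [Bool.eq_iff_iff, PySem.Chars.isIn_iff_infix]
  constructor
  · intro h
    have : c ∈ "TSZYX".toList := (List.singleton_sublist.1 h.sublist)
    simpa [PySem.Set.contains, PySem.Set.mem_ofList] using this
  · intro h
    have : c ∈ "TSZYX".toList := by
      simpa [PySem.Set.contains, PySem.Set.mem_ofList] using h
    rcases List.append_of_mem this with ⟨s, t, hst⟩
    exact ⟨s, t, by simp [hst]⟩

-- ===== VERDICT (by name: the statement is the Claim_ definition above) =====
theorem are_axes_valid_spec : Claim_equal_are_axes_valid := by
  intro axes _
  show are_axes_valid axes = are_axes_valid_alt axes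
  simp only [are_axes_valid, are_axes_valid_alt]
  generalize PySem.Str.upper axes = U
  have hlen0 : (0:Int) ≤ PySem.Str.len U := by
    rw [PySem.Str.len_eq]; positivity
  rw [if_neg (by omega)]
  have hpt : ∀ c : Char, PySem.Str.isIn (String.ofList [c]) (PySem.Str.slice REF_AXES none (some (-1)))
      = PySem.Set.contains (PySem.Set.ofList "TSZYX".toList) c := by
    intro c
    rw [PySem.Str.isIn_eq,
      show (PySem.Str.slice REF_AXES none (some (-1))).toList = "TSZYX".toList by decide,
      show (String.ofList [c]).toList = [c] by simp]
    exact pv_allowed_iff c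
  have hmem : ((U.toList.map (fun s =>
      PySem.Str.isIn (String.ofList [s]) (PySem.Str.slice REF_AXES none (some (-1))))).all (fun b => b))
      = U.toList.all (fun c => PySem.Set.contains (PySem.Set.ofList "TSZYX".toList) c) := by
    rw [List.all_map]
    simp only [Function.comp_def, hpt]
  by_cases hall : U.toList.all (fun c => PySem.Set.contains (PySem.Set.ofList "TSZYX".toList) c) = true
  · rw [if_neg (by rw [hmem]; exact not_not_intro hall), hall, Bool.true_and]
    rw [Bool.eq_iff_iff, List.all_eq_true, beq_iff_eq,
      show ((PySem.Set.ofList U.toList : List Char).length = U.toList.length)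
        ↔ U.toList.Nodup from pv_ofList_length_iff_nodup U.toList,
      ← pv_rfind_all_iff_nodup]
    constructor
    · intro H i hi
      have := H ((i : Int), U.toList[i])
        ((PySem.List.mem_enumerate_iff U.toList 0 _).2 ⟨i, hi, by simp⟩)
      simp only [decide_eq_true_eq, PySem.Str.rfind_eq] at this
      have h2 : (String.ofList [U.toList[i]]).toList = [U.toList[i]] := by simp
      rw [h2] at this
      exact this.symm
    · intro H p hp
      rcases (PySem.List.mem_enumerate_iff U.toList 0 p).1 hp with ⟨k, hk, hpk⟩
      subst hpk
      simp only [decide_eq_true_eq, PySem.Str.rfind_eq]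
      have h2 : (String.ofList [U.toList[k]]).toList = [U.toList[k]] := by simp
      rw [h2]
      simpa using (H k hk).symm
  · rw [if_pos (by rw [hmem]; exact hall), Bool.eq_false_iff.2 hall, Bool.false_and]
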